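-- pv_equiv track=rewrite | github.com/mattprishi/algorithms_hse_25 | hw8/dag/tests.py | is_valid_topological_sort
-- ===== SOURCE A (Python) =====
-- def is_valid_topological_sort(graph, topo_order):
--     """Проверяет корректность топологической сортировки."""
--     if not topo_order:
--         return len(graph) == 0
--
--     position = {vertex: idx for idx, vertex in enumerate(topo_order)}
--
--     for u in graph:
--         for v in graph[u]:
--             if u not in position or v not in position:
--                 continue
--             if position[u] >= position[v]:
--                 return False
--
--     return True
-- ===== SOURCE B (Python) =====
-- def is_valid_topological_sort(graph, topo_order):
--     """One forward pass over topo_order with a growing 'seen' set instead of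
--     building a position index and scanning all graph edges against it."""
--     if not topo_order:
--         return len(graph) == 0
--     seen = set()
--     for u in topo_order:
--         seen.add(u)
--         for v in graph.get(u, []):
--             if v in seen:
--                 return False
--     return True
-- ===== Notes on version B (the rewrite author's own statement) =====
-- stated objective: alternative
-- what changed: Replaces the precomputed vertex->index dict and the edge scan over the whole graph by a single forward pass over topo_order that maintains an incremental 'seen' membership set and rejects an edge whose target was already seen.
-- outside the precondition, e.g. on is_valid_topological_sort({2: [1]}, [1, 2, 1]): A returns True, B returns False
import Mathlib
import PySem

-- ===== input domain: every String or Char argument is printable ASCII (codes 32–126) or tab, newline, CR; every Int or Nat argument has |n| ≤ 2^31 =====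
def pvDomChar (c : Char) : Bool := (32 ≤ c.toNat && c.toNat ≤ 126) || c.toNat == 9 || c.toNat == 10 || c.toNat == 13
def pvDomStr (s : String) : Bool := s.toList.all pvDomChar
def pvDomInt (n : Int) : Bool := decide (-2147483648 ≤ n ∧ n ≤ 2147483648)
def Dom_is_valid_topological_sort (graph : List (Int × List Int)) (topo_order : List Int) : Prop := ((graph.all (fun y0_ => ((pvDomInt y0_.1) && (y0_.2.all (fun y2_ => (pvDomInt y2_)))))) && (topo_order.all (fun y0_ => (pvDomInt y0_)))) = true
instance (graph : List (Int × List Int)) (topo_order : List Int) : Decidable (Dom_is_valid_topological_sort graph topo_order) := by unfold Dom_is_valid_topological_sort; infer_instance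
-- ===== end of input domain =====

-- B replaces A's precomputed position dict + full edge scan by one forward pass over
-- topo_order with a growing 'seen' set (same cost, different decomposition).

-- ===== PORT A =====
-- position = {vertex: idx for idx, vertex in enumerate(topo_order)}
def pvPosDict (topo : List Int) : PySem.Dict Int Int :=
  (PySem.List.enumerate topo).foldl (fun d p => d.insert p.2 p.1) PySem.Dict.empty

-- inner loop: for v in graph[u]: …
def pvCheckNbrs (pos : PySem.Dict Int Int) (u : Int) : List Int → Bool
  | [] => true
  | v :: vs =>
    match pos.get? u, pos.get? v with
    | some pu, some pv => if pu ≥ pv then false else pvCheckNbrs pos u vs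
    | _, _ => pvCheckNbrs pos u vs

-- outer loop: for u in graph: …
def pvCheckGraph (pos : PySem.Dict Int Int) : List (Int × List Int) → Bool
  | [] => true
  | (u, vs) :: rest => if pvCheckNbrs pos u vs then pvCheckGraph pos rest else false

def is_valid_topological_sort (graph : List (Int × List Int)) (topo_order : List Int) : Bool :=
  if topo_order.isEmpty then graph.length == 0
  else pvCheckGraph (pvPosDict topo_order) graph

-- ===== PORT B =====
-- for u in topo_order: seen.add(u); for v in graph.get(u, []): if v in seen: return False
def pvSeenLoop (graph : List (Int × List Int)) (seen : PySem.Set Int) : List Int → Bool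
  | [] => true
  | u :: rest =>
    let s := PySem.Set.add seen u
    if ((PySem.Dict.mk graph).getD u []).any (fun v => PySem.Set.contains s v) then false
    else pvSeenLoop graph s rest

def is_valid_topological_sort_alt (graph : List (Int × List Int)) (topo_order : List Int) : Bool :=
  if topo_order.isEmpty then graph.length == 0
  else pvSeenLoop graph PySem.Set.empty topo_order

-- ===== PRECONDITION & SPEC =====
-- Pre_ excludes topo_order lists with duplicate vertices, on which A's last-index position
-- dict and B's first-occurrence seen-set are two equally accidental readings of a meaningless
-- input; it also excludes duplicate keys in the association list 'graph', which a Python dict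
-- cannot even represent (a dict keeps one entry per key).
def Pre_is_valid_topological_sort (graph : List (Int × List Int)) (topo_order : List Int) : Prop :=
  topo_order.Nodup ∧ (graph.map Prod.fst).Nodup
instance (graph : List (Int × List Int)) (topo_order : List Int) : Decidable (Pre_is_valid_topological_sort graph topo_order) := by unfold Pre_is_valid_topological_sort; infer_instance

def pvWitness_is_valid_topological_sort : (List (Int × List Int)) × List Int :=
  ([(0, [1]), (1, [2])], [0, 1, 2])

def Spec_is_valid_topological_sort (graph : List (Int × List Int)) (topo_order : List Int) (out : Bool) : Prop := out = is_valid_topological_sort_alt graph topo_order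
instance (graph : List (Int × List Int)) (topo_order : List Int) (out : Bool) : Decidable (Spec_is_valid_topological_sort graph topo_order out) := by unfold Spec_is_valid_topological_sort; infer_instance

-- ===== CLAIM (what is proved, stated in full; the proofs are below) =====
def Claim_equal_is_valid_topological_sort : Prop := ∀ (graph : List (Int × List Int)) (topo_order : List Int), Dom_is_valid_topological_sort graph topo_order → Pre_is_valid_topological_sort graph topo_order → Spec_is_valid_topological_sort graph topo_order (is_valid_topological_sort graph topo_order)

-- ===== LEMMAS AND PROOFS =====

-- the position dict of a duplicate-free topo order maps x to its index
theorem pvPosFold_get? (topo : List Int) (s : Int) (d : PySem.Dict Int Int) (x : Int)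
    (hnd : topo.Nodup) :
    ((PySem.List.enumerate topo s).foldl (fun d p => d.insert p.2 p.1) d).get? x
      = if x ∈ topo then some (s + (topo.idxOf x : Int)) else d.get? x := by
  induction topo generalizing s d with
  | nil => simp
  | cons y ys ih =>
    rw [PySem.List.enumerate_cons]
    simp only [List.foldl_cons]
    rw [ih _ _ (by exact hnd.of_cons)]
    by_cases hxy : x = y
    · subst hxy
      have hx : x ∉ ys := (List.nodup_cons.mp hnd).1
      simp [hx, PySem.Dict.get?_insert_self, List.idxOf_cons_self]
    · by_cases hxys : x ∈ ys
      · rw [if_pos hxys, if_pos (List.mem_cons_of_mem _ hxys),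
            List.idxOf_cons_ne _ (Ne.symm hxy)]
        congr 1
        push_cast
        ring
      · have : x ∉ y :: ys := by simp [hxy, hxys]
        simp [hxys, this, PySem.Dict.get?_insert_of_ne _ _ hxy]

theorem pvCheckNbrs_iff (pos : PySem.Dict Int Int) (u : Int) (vs : List Int) :
    pvCheckNbrs pos u vs = true ↔
      ∀ v ∈ vs, ∀ pu pv : Int, pos.get? u = some pu → pos.get? v = some pv → pu < pv := by
  induction vs with
  | nil => simp [pvCheckNbrs]
  | cons v vs ih =>
    rcases hu : pos.get? u with _ | pu
    · rw [show pvCheckNbrs pos u (v :: vs) = pvCheckNbrs pos u vs by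
        simp [pvCheckNbrs, hu], ih]
      constructor
      · intro _ w hw pu' pv' hu' _
        exact absurd hu' (by simp)
      · intro h w hw pu' pv' hu' hv'
        rw [hu] at hu'; cases hu'
    · rcases hv : pos.get? v with _ | pv
      · rw [show pvCheckNbrs pos u (v :: vs) = pvCheckNbrs pos u vs by
          simp [pvCheckNbrs, hu, hv], ih]
        constructor
        · intro h w hw pu' pv' hu' hv'
          rcases List.mem_cons.mp hw with rfl | hw
          · rw [hv] at hv'; cases hv'
          · exact h w hw pu' pv' (hu.trans hu') hv'
        · intro h w hw pu' pv' hu' hv'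
          exact h w (List.mem_cons_of_mem _ hw) pu' pv' (hu.symm.trans hu') hv'
      · rw [show pvCheckNbrs pos u (v :: vs)
            = if pu ≥ pv then false else pvCheckNbrs pos u vs by
          simp [pvCheckNbrs, hu, hv]]
        by_cases hge : pu ≥ pv
        · rw [if_pos hge]
          constructor
          · intro h; exact absurd h (by simp)
          · intro h
            exact absurd (h v List.mem_cons_self pu pv rfl hv) (by omega)
        · rw [if_neg hge, ih]
          constructor
          · intro h w hw pu' pv' hu' hv'
            rcases List.mem_cons.mp hw with rfl | hw
            · rw [hv] at hv'; cases hv'; cases hu'; omega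
            · exact h w hw pu' pv' (hu.trans hu') hv'
          · intro h w hw pu' pv' hu' hv'
            exact h w (List.mem_cons_of_mem _ hw) pu' pv' (hu.symm.trans hu') hv'

theorem pvCheckGraph_iff (pos : PySem.Dict Int Int) (g : List (Int × List Int)) :
    pvCheckGraph pos g = true ↔ ∀ p ∈ g, pvCheckNbrs pos p.1 p.2 = true := by
  induction g with
  | nil => simp [pvCheckGraph]
  | cons p rest ih =>
    obtain ⟨u, vs⟩ := p
    simp only [pvCheckGraph]
    by_cases h : pvCheckNbrs pos u vs = true
    · rw [if_pos h, ih]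
      constructor
      · intro hall p hp
        rcases List.mem_cons.mp hp with rfl | hp
        · exact h
        · exact hall p hp
      · intro hall p hp
        exact hall p (List.mem_cons_of_mem _ hp)
    · rw [if_neg h]
      constructor
      · intro hf; exact absurd hf (by simp)
      · intro hall; exact absurd (hall (u, vs) List.mem_cons_self) h

theorem pvSeenLoop_iff (graph : List (Int × List Int)) (seen : PySem.Set Int)
    (rest : List Int) :
    pvSeenLoop graph seen rest = true ↔
      ∀ (j : Nat) (hj : j < rest.length),
        ∀ v ∈ (PySem.Dict.mk graph).getD rest[j] [],
          v ∉ seen ∧ v ∉ rest.take (j + 1) := by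
  induction rest generalizing seen with
  | nil => simp [pvSeenLoop]
  | cons u rs ih =>
    simp only [pvSeenLoop]
    by_cases hbad : ((PySem.Dict.mk graph).getD u []).any
        (fun v => PySem.Set.contains (PySem.Set.add seen u) v) = true
    · simp only [hbad, if_pos]
      rcases List.any_eq_true.mp hbad with ⟨v, hv, hc⟩
      have hvmem : v ∈ PySem.Set.add seen u := (by simpa [PySem.Set.contains] using hc)
      constructor
      · intro h; exact absurd h (by simp)
      · intro h
        have := h 0 (by simp) v (by simpa using hv)
        rcases (PySem.Set.mem_add _ _ _).mp hvmem with hs | rfl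
        · exact absurd hs this.1
        · exact absurd (by simp) this.2
    · simp only [hbad, if_neg, Bool.false_eq_true, not_false_iff]
      rw [ih]
      constructor
      · intro h j hj v hv
        cases j with
        | zero =>
          have hnot : v ∉ PySem.Set.add seen u := by
            intro hmem
            exact hbad (List.any_eq_true.mpr
              ⟨v, by simpa using hv, (by simpa [PySem.Set.contains] using hmem)⟩)
          rw [PySem.Set.mem_add] at hnot; push_neg at hnot
          exact ⟨hnot.1, by simpa using hnot.2⟩
        | succ j =>
          have hj' : j < rs.length := by simpa using hj
          have := h j hj' v (by simpa using hv)
          have hadd := this.1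
          rw [PySem.Set.mem_add] at hadd; push_neg at hadd
          refine ⟨hadd.1, ?_⟩
          simp only [List.take_succ_cons, List.mem_cons]
          push_neg
          exact ⟨hadd.2, this.2⟩
      · intro h j hj v hv
        have := h (j + 1) (by simpa using Nat.succ_lt_succ hj) v (by simpa using hv)
        constructor
        · rw [PySem.Set.mem_add]; push_neg
          refine ⟨this.1, ?_⟩
          have := this.2
          simp only [List.take_succ_cons, List.mem_cons] at this
          push_neg at this; exact this.1
        · have := this.2
          simp only [List.take_succ_cons, List.mem_cons] at this
          push_neg at this; exact this.2

-- neighbour lists through the dict view of a duplicate-key-free association list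
theorem pvGetD_mk_mem (graph : List (Int × List Int)) (u v : Int)
    (hnd : (graph.map Prod.fst).Nodup) :
    v ∈ (PySem.Dict.mk graph).getD u [] ↔ ∃ p ∈ graph, p.1 = u ∧ v ∈ p.2 := by
  induction graph with
  | nil =>
    simp [PySem.Dict.getD_eq_get?_getD]
    simp [PySem.Dict.get?]
  | cons q rest ih =>
    obtain ⟨k, vs⟩ := q
    have hk : k ∉ rest.map Prod.fst := (List.nodup_cons.mp (by simpa using hnd)).1
    rw [PySem.Dict.getD_eq_get?_getD, PySem.Dict.get?_mk_cons]
    by_cases hku : k = u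
    · subst hku
      simp only [beq_self_eq_true, if_pos, Option.getD_some]
      constructor
      · intro hv; exact ⟨(k, vs), by simp, rfl, hv⟩
      · rintro ⟨p, hp, hpu, hv⟩
        rcases List.mem_cons.mp hp with rfl | hp
        · exact hv
        · exact absurd (hpu ▸ List.mem_map_of_mem hp) hk
    · have : (k == u) = false := by simp [hku]
      rw [this]
      simp only [Bool.false_eq_true, if_neg, not_false_iff]
      rw [← PySem.Dict.getD_eq_get?_getD, ih (by exact (List.nodup_cons.mp (by simpa using hnd)).2)]
      constructor
      · rintro ⟨p, hp, hpu, hv⟩; exact ⟨p, List.mem_cons_of_mem _ hp, hpu, hv⟩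
      · rintro ⟨p, hp, hpu, hv⟩
        rcases List.mem_cons.mp hp with rfl | hp
        · exact absurd hpu hku
        · exact ⟨p, hp, hpu, hv⟩

theorem pvMem_take_iff (topo : List Int) (v : Int) (j : Nat) :
    v ∈ topo.take (j + 1) ↔ v ∈ topo ∧ topo.idxOf v ≤ j := by
  constructor
  · intro h
    have hv : v ∈ topo := List.mem_of_mem_take h
    have := (List.mem_take_iff_idxOf_lt hv).mp h
    exact ⟨hv, by omega⟩
  · rintro ⟨hv, hle⟩
    exact (List.mem_take_iff_idxOf_lt hv).mpr (by omega)

-- the common characterisation: no edge (u → v) with both endpoints listed and v not after u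
theorem pv_main (graph : List (Int × List Int)) (topo : List Int)
    (hnd : topo.Nodup) (hg : (graph.map Prod.fst).Nodup) :
    pvCheckGraph (pvPosDict topo) graph = pvSeenLoop graph PySem.Set.empty topo := by
  rw [Bool.eq_iff_iff, pvCheckGraph_iff, pvSeenLoop_iff]
  have hpos : ∀ x : Int, (pvPosDict topo).get? x
      = if x ∈ topo then some ((topo.idxOf x : Int)) else none := by
    intro x
    have := pvPosFold_get? topo 0 PySem.Dict.empty x hnd
    simpa [pvPosDict] using this
  constructor
  · -- A-condition → B-condition
    intro h j hj v hv
    rcases (pvGetD_mk_mem graph topo[j] v hg).mp hv with ⟨p, hp, hpu, hvp⟩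
    have hA := (pvCheckNbrs_iff _ _ _).mp (h p hp) v hvp
    refine ⟨by simp [PySem.Set.empty], ?_⟩
    intro htake
    rcases (pvMem_take_iff topo v j).mp htake with ⟨hvt, hle⟩
    have hut : p.1 ∈ topo := hpu ▸ List.getElem_mem hj
    have hidx : topo.idxOf topo[j] = j := List.Nodup.idxOf_getElem hnd j hj
    have := hA (topo.idxOf p.1) (topo.idxOf v)
      (by rw [hpos]; simp [hut]) (by rw [hpos]; simp [hvt])
    have : (topo.idxOf p.1 : Int) < topo.idxOf v := this
    rw [hpu, hidx] at this
    omega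
  · -- B-condition → A-condition
    intro h p hp
    rw [pvCheckNbrs_iff]
    intro v hv pu pv hpu hpv
    rw [hpos] at hpu hpv
    by_cases hut : p.1 ∈ topo
    · by_cases hvt : v ∈ topo
      · rw [if_pos hut] at hpu; rw [if_pos hvt] at hpv
        cases hpu; cases hpv
        have hj : topo.idxOf p.1 < topo.length := List.idxOf_lt_length_of_mem hut
        have hget : topo[topo.idxOf p.1] = p.1 := List.getElem_idxOf hj
        have hB := h (topo.idxOf p.1) hj v
          ((pvGetD_mk_mem graph _ v hg).mpr ⟨p, hp, hget.symm ▸ rfl, hv⟩)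
        have hnt := hB.2
        have : ¬ (v ∈ topo ∧ topo.idxOf v ≤ topo.idxOf p.1) := by
          intro hc; exact hnt ((pvMem_take_iff topo v _).mpr hc)
        push_neg at this
        have := this hvt
        omega
      · rw [if_neg hvt] at hpv; cases hpv
    · rw [if_neg hut] at hpu; cases hpu

-- ===== VERDICT (by name: the statement is the Claim_ definition above) =====
theorem is_valid_topological_sort_spec : Claim_equal_is_valid_topological_sort := by
  intro graph topo _hdom hpre
  unfold Spec_is_valid_topological_sort
  unfold is_valid_topological_sort is_valid_topological_sort_alt
  by_cases he : topo.isEmpty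
  · simp [he]
  · simp only [he, if_neg, Bool.false_eq_true, not_false_iff]
    exact pv_main graph topo hpre.1 hpre.2
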